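-- pv_equiv track=rewrite | github.com/jacksonhturner/orthogarden | bin/pull_third_pos.py | change_thirds
-- ===== SOURCE A (Python) =====
-- def change_thirds(seq):
--     third_seq = ''
--     for idx, base in enumerate(seq):
--         if (idx+1) % 3 == 0:
--             third_seq += 'N'
--         else:
--             third_seq += base
--     return third_seq
-- ===== SOURCE B (Python) =====
-- def change_thirds(seq):
--     chunks = [seq[i:i+3] for i in range(0, len(seq), 3)]
--     return ''.join(c[:2] + 'N' if len(c) == 3 else c for c in chunks)
-- ===== Notes on version B (the rewrite author's own statement) =====
-- stated objective: alternative
-- what changed: Replaces A's per-character loop with an index-modulo branch by splitting the string into 3-character chunks and rewriting the last character of each full chunk.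
import Mathlib
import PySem

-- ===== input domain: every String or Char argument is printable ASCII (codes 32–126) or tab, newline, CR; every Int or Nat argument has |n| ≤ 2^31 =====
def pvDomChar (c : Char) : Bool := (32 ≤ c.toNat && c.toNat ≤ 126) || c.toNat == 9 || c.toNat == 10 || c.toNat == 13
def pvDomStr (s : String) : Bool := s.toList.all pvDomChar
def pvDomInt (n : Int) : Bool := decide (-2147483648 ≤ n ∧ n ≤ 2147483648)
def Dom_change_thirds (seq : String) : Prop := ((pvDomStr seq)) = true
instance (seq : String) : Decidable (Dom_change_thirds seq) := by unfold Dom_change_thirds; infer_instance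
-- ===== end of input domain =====

-- B replaces A's per-character loop (branching on (idx+1) % 3) by splitting into
-- 3-character chunks and rewriting each full chunk's last character to 'N' (alternative decomposition).

-- ===== PORT A =====
-- literal port of A: enumerate, branch on (idx+1) % 3 == 0, accumulate by appending
def change_thirds (seq : String) : String :=
  String.ofList ((PySem.List.enumerate seq.toList).foldl
    (fun acc p => acc ++ (if PySem.Int.mod (p.1 + 1) 3 == 0 then ['N'] else [p.2])) [])

-- ===== PORT B =====
-- B's chunking: [seq[i:i+3] for i in range(0, len(seq), 3)] taken 3 characters at a time
def altChunks : List Char → List (List Char)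
  | [] => []
  | [a] => [[a]]
  | [a, b] => [[a, b]]
  | a :: b :: c :: rest => [a, b, c] :: altChunks rest

-- ''.join(c[:2] + 'N' if len(c) == 3 else c for c in chunks)
def change_thirds_alt (seq : String) : String :=
  String.ofList ((altChunks seq.toList).flatMap
    (fun c => if c.length == 3 then c.take 2 ++ ['N'] else c))

-- ===== PRECONDITION & SPEC =====
def Spec_change_thirds (seq : String) (out : String) : Prop := out = change_thirds_alt seq
instance (seq : String) (out : String) : Decidable (Spec_change_thirds seq out) := by unfold Spec_change_thirds; infer_instance

-- ===== CLAIM (what is proved, stated in full; the proofs are below) =====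
def Claim_equal_change_thirds : Prop := ∀ (seq : String), Dom_change_thirds seq → Spec_change_thirds seq (change_thirds seq)

-- ===== LEMMAS AND PROOFS =====

-- A's body as a per-element emitter
def aEmit (p : Int × Char) : List Char :=
  if PySem.Int.mod (p.1 + 1) 3 == 0 then ['N'] else [p.2]

theorem aEmit_key : ∀ (l : List Char) (s : Int), PySem.Int.mod s 3 = 0 →
    (PySem.List.enumerate l s).flatMap aEmit
      = (altChunks l).flatMap (fun c => if c.length == 3 then c.take 2 ++ ['N'] else c) := by
  intro l
  induction l using altChunks.induct with
  | case1 => intro s _; simp [PySem.List.enumerate_nil, altChunks]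
  | case2 a =>
    intro s hs
    have hs' : (3:Int) ∣ s := (PySem.Int.mod_eq_zero_iff_dvd s 3).mp hs
    have h1 : ¬ (3:Int) ∣ (s + 1) := by omega
    simp [PySem.List.enumerate_cons, PySem.List.enumerate_nil, altChunks, aEmit, h1]
  | case3 a b =>
    intro s hs
    have hs' : (3:Int) ∣ s := (PySem.Int.mod_eq_zero_iff_dvd s 3).mp hs
    have h1 : ¬ (3:Int) ∣ (s + 1) := by omega
    have h2 : ¬ (3:Int) ∣ (s + 1 + 1) := by omega
    simp [PySem.List.enumerate_cons, PySem.List.enumerate_nil, altChunks, aEmit, h1, h2]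
  | case4 a b c rest ih =>
    intro s hs
    have hs' : (3:Int) ∣ s := (PySem.Int.mod_eq_zero_iff_dvd s 3).mp hs
    have h1 : ¬ (3:Int) ∣ (s + 1) := by omega
    have h2 : ¬ (3:Int) ∣ (s + 1 + 1) := by omega
    have h3 : (3:Int) ∣ (s + 1 + 1 + 1) := by omega
    have ih' := ih (s + 1 + 1 + 1) ((PySem.Int.mod_eq_zero_iff_dvd _ _).mpr h3)
    simp [PySem.List.enumerate_cons, altChunks, aEmit, h1, h2, h3, ih']

-- ===== VERDICT (by name: the statement is the Claim_ definition above) =====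
theorem change_thirds_spec : Claim_equal_change_thirds := by
  intro seq _
  unfold Spec_change_thirds change_thirds change_thirds_alt
  rw [show (fun (acc : List Char) (p : Int × Char) =>
        acc ++ (if PySem.Int.mod (p.1 + 1) 3 == 0 then ['N'] else [p.2]))
      = (fun acc p => acc ++ aEmit p) from rfl,
    PySem.List.foldl_append_eq_flatMap]
  rw [aEmit_key seq.toList 0 (by decide)]
  simp
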